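-- pv_equiv track=rewrite | github.com/chaitanya56731/LEETCODE_SOLUTIONS | 560-subarray-sum-equals-k/subarray-sum-equals-k.py | subarraySum
-- ===== SOURCE A (Python) =====
-- from typing import List
--
-- def subarraySum(nums: List[int], k: int) -> int:
--     count = 0
--     prefix_sum = 0
--     freq ={0:1}
--     for x in nums:
--         prefix_sum += x
--         if prefix_sum - k in freq:
--             count += freq[prefix_sum - k]
--         freq[prefix_sum] = freq.get(prefix_sum,0)+1
--     return count
-- ===== SOURCE B (Python) =====
-- from typing import List
--
-- def subarraySum(nums: List[int], k: int) -> int: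
--     # Brute force: for every suffix, count its prefixes summing to k.
--     # No hashmap, no prefix-sum frequencies.
--     count = 0
--     suffix = nums
--     while suffix:
--         s = 0
--         for v in suffix:
--             s += v
--             if s == k:
--                 count += 1
--         suffix = suffix[1:]
--     return count
-- ===== Notes on version B (the rewrite author's own statement) =====
-- stated objective: simpler
-- what changed: Replaced the prefix-sum/hash-frequency single pass by a plain brute-force scan that walks every suffix and counts its prefixes summing to k, maintaining no dictionary at all.
import Mathlib
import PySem

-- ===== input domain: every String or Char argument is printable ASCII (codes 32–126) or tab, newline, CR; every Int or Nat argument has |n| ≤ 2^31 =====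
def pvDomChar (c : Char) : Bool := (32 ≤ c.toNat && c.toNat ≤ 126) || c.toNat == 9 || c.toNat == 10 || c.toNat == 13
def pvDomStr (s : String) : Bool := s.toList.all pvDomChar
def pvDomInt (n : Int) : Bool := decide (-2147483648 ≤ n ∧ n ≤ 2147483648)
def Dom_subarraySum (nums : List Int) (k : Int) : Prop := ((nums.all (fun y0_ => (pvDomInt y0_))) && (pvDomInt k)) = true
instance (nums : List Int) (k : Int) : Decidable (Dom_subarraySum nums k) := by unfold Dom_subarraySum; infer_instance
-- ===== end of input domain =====

-- B drops A's prefix-sum/frequency dictionary for a plain brute-force suffix scan (simpler; not faster).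

-- ===== PORT A =====
-- one loop step of A: prefix_sum += x; conditional count bump from freq; freq[prefix_sum] += 1
def aStep (k : Int) (st : Int × Int × PySem.Dict Int Int) (x : Int) : Int × Int × PySem.Dict Int Int :=
  let ps := st.2.1 + x
  let count := match st.2.2.get? (ps - k) with   -- 'if ps - k in freq: count += freq[ps - k]'
    | some v => st.1 + v
    | none => st.1
  (count, ps, st.2.2.insert ps (st.2.2.getD ps 0 + 1))

def subarraySum (nums : List Int) (k : Int) : Int :=
  (nums.foldl (aStep k) (0, 0, PySem.Dict.empty.insert 0 1)).1

-- ===== PORT B =====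
-- one step of the inner 'for v in suffix' loop, state (s, count)
def bStep (k : Int) (p : Int × Int) (v : Int) : Int × Int :=
  let s := p.1 + v
  (s, if s = k then p.2 + 1 else p.2)

def altInner (k : Int) (l : List Int) (count : Int) : Int :=
  (l.foldl (bStep k) (0, count)).2

-- the 'while suffix:' loop, recursing on the suffix
def altLoop (k : Int) : List Int → Int → Int
  | [], count => count
  | x :: xs, count => altLoop k xs (altInner k (x :: xs) count)

def subarraySum_alt (nums : List Int) (k : Int) : Int :=
  altLoop k nums 0

-- ===== PRECONDITION & SPEC =====
def Spec_subarraySum (nums : List Int) (k : Int) (out : Int) : Prop := out = subarraySum_alt nums k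
instance (nums : List Int) (k : Int) (out : Int) : Decidable (Spec_subarraySum nums k out) := by unfold Spec_subarraySum; infer_instance

-- ===== CLAIM (what is proved, stated in full; the proofs are below) =====
def Claim_equal_subarraySum : Prop := ∀ (nums : List Int) (k : Int), Dom_subarraySum nums k → Spec_subarraySum nums k (subarraySum nums k)

-- ===== LEMMAS AND PROOFS =====

-- number of suffixes of xs (including the empty one) whose sum is t
def cntSuf : List Int → Int → Int
  | [], t => if t = 0 then 1 else 0
  | x :: xs, t => (if (x :: xs).sum = t then 1 else 0) + cntSuf xs t

lemma bStep_eq (k : Int) (s c v : Int) :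
    bStep k (s, c) v = (s + v, if s + v = k then c + 1 else c) := rfl

-- inner fold: first component is the running sum
lemma inner_fst (k : Int) : ∀ (l : List Int) (s c : Int),
    (l.foldl (bStep k) (s, c)).1 = s + l.sum := by
  intro l
  induction l with
  | nil => intro s c; simp
  | cons y ys ih =>
    intro s c
    rw [List.foldl_cons, bStep_eq, ih, List.sum_cons]
    ring

-- inner fold: second component is linear in the starting count
lemma inner_snd_add (k : Int) : ∀ (l : List Int) (s c d : Int),
    (l.foldl (bStep k) (s, c + d)).2 = (l.foldl (bStep k) (s, c)).2 + d := by
  intro l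
  induction l with
  | nil => intro s c d; simp
  | cons y ys ih =>
    intro s c d
    rw [List.foldl_cons, List.foldl_cons, bStep_eq, bStep_eq]
    by_cases h : s + y = k
    · rw [if_pos h, if_pos h, show c + d + 1 = (c + 1) + d by ring, ih]
    · rw [if_neg h, if_neg h, ih]

lemma altInner_add (k : Int) (l : List Int) (c d : Int) :
    altInner k l (c + d) = altInner k l c + d := by
  unfold altInner; exact inner_snd_add k l 0 c d

lemma altInner_append (k : Int) (l : List Int) (x c : Int) :
    altInner k (l ++ [x]) c = altInner k l c + (if l.sum + x = k then 1 else 0) := by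
  unfold altInner
  rw [List.foldl_append, List.foldl_cons, List.foldl_nil]
  have hfst : (l.foldl (bStep k) (0, c)).1 = 0 + l.sum := inner_fst k l 0 c
  rw [show bStep k (l.foldl (bStep k) (0, c)) x =
      ((l.foldl (bStep k) (0, c)).1 + x,
        if (l.foldl (bStep k) (0, c)).1 + x = k
        then (l.foldl (bStep k) (0, c)).2 + 1 else (l.foldl (bStep k) (0, c)).2) from rfl,
    hfst]
  split_ifs with h1 h2 h2 <;> first | rfl | omega

lemma altLoop_add (k : Int) : ∀ (l : List Int) (c d : Int),
    altLoop k l (c + d) = altLoop k l c + d := by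
  intro l
  induction l with
  | nil => intro c d; simp [altLoop]
  | cons y ys ih =>
    intro c d
    simp only [altLoop]
    rw [altInner_add, ih]

-- peeling the last element off B's outer loop
lemma altLoop_append (k x : Int) : ∀ (xs : List Int) (c : Int),
    altLoop k (xs ++ [x]) c = altLoop k xs c + cntSuf xs (k - x) := by
  intro xs
  induction xs with
  | nil =>
    intro c
    simp only [List.nil_append, altLoop, cntSuf, altInner, List.foldl_cons, List.foldl_nil,
      bStep_eq]
    split_ifs <;> omega
  | cons y ys ih =>
    intro c
    simp only [List.cons_append, altLoop]
    rw [show (y :: (ys ++ [x])) = (y :: ys) ++ [x] from rfl, altInner_append, ih, altLoop_add]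
    simp only [cntSuf]
    split_ifs with h1 h2 h2 <;> omega

-- counting in the prefix-sum list = counting suffix sums
lemma scanl_count (v : Int) : ∀ (xs : List Int) (b : Int),
    ((List.scanl (· + ·) b xs).count v : Int) = cntSuf xs (b + xs.sum - v) := by
  intro xs
  induction xs with
  | nil =>
    intro b
    simp only [List.scanl_nil, cntSuf, List.sum_nil]
    by_cases h : b = v
    · rw [if_pos (by omega)]; simp [h]
    · rw [if_neg (by omega)]; simp [h]
  | cons y ys ih =>
    intro b
    simp only [List.scanl_cons, cntSuf, List.sum_cons, List.count_cons, beq_iff_eq]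
    push_cast
    rw [ih, show b + y + ys.sum - v = b + (y + ys.sum) - v by ring]
    split_ifs <;> omega

lemma scanl_append_singleton : ∀ (xs : List Int) (b x : Int),
    List.scanl (· + ·) b (xs ++ [x]) = List.scanl (· + ·) b xs ++ [b + xs.sum + x] := by
  intro xs
  induction xs with
  | nil => intro b x; simp
  | cons y ys ih =>
    intro b x
    simp only [List.cons_append, List.scanl_cons, List.sum_cons, ih]
    rw [show b + y + ys.sum + x = b + (y + ys.sum) + x by ring]

-- A's conditional count bump against a counter = adding the list count
lemma counter_bump (l : List Int) (v c : Int) :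
    (match (PySem.Dict.counter l).get? v with
      | some w => c + w
      | none => c) = c + (l.count v : Int) := by
  cases h : (PySem.Dict.counter l).get? v with
  | none =>
    have hc : (PySem.Dict.counter l).contains v = false := by
      rw [PySem.Dict.contains_eq_isSome_get?, h]; rfl
    rw [PySem.Dict.contains_counter] at hc
    have : l.count v = 0 := by
      rw [List.count_eq_zero]
      intro hmem
      simp [List.contains_eq_mem, hmem] at hc
    simp [this]
  | some w =>
    have hw : (PySem.Dict.counter l).getD v 0 = w := by
      rw [PySem.Dict.getD_eq_get?_getD, h]; rfl
    rw [PySem.Dict.getD_counter] at hw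
    simp [← hw]

-- the counter update in A's loop appends one element to the counted list
lemma counter_snoc (l : List Int) (x : Int) :
    (PySem.Dict.counter l).insert x ((PySem.Dict.counter l).getD x 0 + 1) =
      PySem.Dict.counter (l ++ [x]) := by
  rw [← PySem.Dict.foldl_insert_getD_add_one_eq_counter,
    ← PySem.Dict.foldl_insert_getD_add_one_eq_counter, List.foldl_append]
  rfl

-- the master invariant of A's fold: count is B's value, prefix_sum is the running sum,
-- freq is the counter of all prefix sums so far
lemma a_fold_invariant (k : Int) : ∀ (xs : List Int),
    xs.foldl (aStep k) (0, 0, PySem.Dict.empty.insert 0 1) =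
      (altLoop k xs 0, xs.sum, PySem.Dict.counter (List.scanl (· + ·) 0 xs)) := by
  intro xs
  induction xs using List.reverseRecOn with
  | nil =>
    simp only [List.foldl_nil, altLoop, List.sum_nil, List.scanl_nil, Prod.mk.injEq]
    refine ⟨trivial, trivial, ?_⟩
    rw [show PySem.Dict.counter [(0 : Int)] =
        PySem.Dict.empty.insert 0 (PySem.Dict.empty.getD (0 : Int) (0 : Int) + 1) from
      (PySem.Dict.foldl_insert_getD_add_one_eq_counter [(0 : Int)]).symm]
    rw [PySem.Dict.getD_empty]
    norm_num
  | append_singleton ys x ih =>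
    rw [List.foldl_append, ih, List.foldl_cons, List.foldl_nil]
    rw [show aStep k (altLoop k ys 0, ys.sum, PySem.Dict.counter (List.scanl (· + ·) 0 ys)) x =
        ((match (PySem.Dict.counter (List.scanl (· + ·) 0 ys)).get? (ys.sum + x - k) with
          | some w => altLoop k ys 0 + w
          | none => altLoop k ys 0),
         ys.sum + x,
         (PySem.Dict.counter (List.scanl (· + ·) 0 ys)).insert (ys.sum + x)
           ((PySem.Dict.counter (List.scanl (· + ·) 0 ys)).getD (ys.sum + x) 0 + 1)) from rfl]
    simp only [Prod.mk.injEq]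
    refine ⟨?_, ?_, ?_⟩
    · rw [counter_bump, scanl_count, altLoop_append,
        show (0 : Int) + ys.sum - (ys.sum + x - k) = k - x by ring]
    · rw [List.sum_append, List.sum_cons, List.sum_nil, add_zero]
    · rw [counter_snoc, scanl_append_singleton,
        show (0 : Int) + ys.sum + x = ys.sum + x by ring]

-- ===== VERDICT (by name: the statement is the Claim_ definition above) =====
theorem subarraySum_spec : Claim_equal_subarraySum := by
  intro nums k _
  show subarraySum nums k = subarraySum_alt nums k
  unfold subarraySum subarraySum_alt
  rw [a_fold_invariant]
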